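-- pv_equiv track=rewrite | github.com/shhuan1989/algorithms | leetcode/hard/number-of-ways-to-wear-different-hats-to-each-other.py | numberWays
-- ===== SOURCE A (Python) =====
-- from typing import List
--
-- def numberWays(hats: List[List[int]]) -> int:
--     n = len(hats)
--
--
--     dp = [0 for _ in range(1 << n)]
--     dp[0] = 1
--     owner = [[] for _ in range(41)]
--     for i, v in enumerate(hats):
--         for j in v:
--             owner[j].append(i)
--
--     for i in range(41):
--         ndp = [v for v in dp]
--         for j in owner[i]:
--             for s in range(1 << n):
--                 if s & (1 << j) == 0:
--                     ndp[s | (1 << j)] += dp[s]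
--                     ndp[s | (1 << j)] %= 10 ** 9 + 7
--         dp = ndp
--     return dp[-1]
-- ===== SOURCE B (Python) =====
-- def numberWays(hats):
--     MOD = 10 ** 9 + 7
--     n = len(hats)
--     full = (1 << n) - 1
--     owner = [[] for _ in range(41)]
--     for i, v in enumerate(hats):
--         for j in v:
--             owner[j].append(i)
--
--     memo = {}
--
--     def f(hat, mask):
--         # ways to extend `mask` to `full` using hats hat..40, mod MOD
--         if hat == 41:
--             return 1 if mask == full else 0
--         key = (hat, mask)
--         if key not in memo:
--             total = f(hat + 1, mask)
--             for p in owner[hat]: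
--                 if not mask >> p & 1:
--                     total += f(hat + 1, mask | 1 << p)
--             memo[key] = total % MOD
--         return memo[key]
--
--     return f(0, 0)
-- ===== Notes on version B (the rewrite author's own statement) =====
-- stated objective: alternative
-- what changed: A runs a bottom-up array DP, scattering dp[s] into a copied 2^n-size table per hat owner; B replaces the table entirely by top-down memoized recursion f(hat, mask) = ways to complete mask using hats hat..40 (a dict-cached recursion over the hat index), returning f(0, 0).
import Mathlib
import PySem

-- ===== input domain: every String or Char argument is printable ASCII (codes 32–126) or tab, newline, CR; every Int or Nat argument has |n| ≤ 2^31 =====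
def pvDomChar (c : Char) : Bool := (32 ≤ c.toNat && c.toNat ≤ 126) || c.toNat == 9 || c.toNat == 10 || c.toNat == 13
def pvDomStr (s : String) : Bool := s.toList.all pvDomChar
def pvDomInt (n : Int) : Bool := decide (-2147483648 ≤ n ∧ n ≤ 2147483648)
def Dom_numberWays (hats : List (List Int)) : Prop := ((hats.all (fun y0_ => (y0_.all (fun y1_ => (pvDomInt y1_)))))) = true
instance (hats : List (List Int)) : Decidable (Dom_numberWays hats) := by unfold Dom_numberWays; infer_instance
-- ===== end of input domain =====

-- B replaces A's bottom-up scatter DP over a 2^n table by top-down recursion over the hat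
-- index, f(hat, mask) = ways to complete mask with hats hat..40 (objective: alternative;
-- Source B's memo dict is a pure evaluation cache: the port is the plain recursion it caches).

-- ===== PORT A =====
-- shared helper: both Python versions build owner with the identical append loop.
-- owner[j].append(i): Python resolves a possibly negative index into the 41-list;
-- an index outside [-41,40] raises IndexError in Python (excluded by Pre_; here: no-op).
def pvAppendAt (ow : List (List Nat)) (j : Int) (i : Nat) : List (List Nat) :=
  let k := if j < 0 then j + 41 else j
  if 0 ≤ k ∧ k < 41 then ow.modify k.toNat (fun l => l ++ [i]) else ow

def pvOwner (hats : List (List Int)) : List (List Nat) :=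
  (PySem.List.enumerate hats).foldl
    (fun ow iv => iv.2.foldl (fun ow j => pvAppendAt ow j iv.1.toNat) ow)
    (List.replicate 41 [])

def pvP : Int := 10 ^ 9 + 7

-- one iteration of A's innermost loop body: if s & (1<<j) == 0: ndp[s|bit] += dp[s]; ndp[s|bit] %= p
def pvScatStep (dp : List Int) (bit : Nat) (ndp : List Int) (s : Nat) : List Int :=
  if s &&& bit = 0 then
    ndp.set (s ||| bit) (PySem.Int.mod (ndp.getD (s ||| bit) 0 + dp.getD s 0) pvP)
  else ndp

def numberWays (hats : List (List Int)) : Int :=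
  let n := hats.length
  let dp0 := (List.replicate (1 <<< n) (0 : Int)).set 0 1
  let owner := pvOwner hats
  let dp := (List.range 41).foldl
    (fun dp i =>
      (owner.getD i []).foldl
        (fun ndp j => (List.range (1 <<< n)).foldl (pvScatStep dp (1 <<< j)) ndp)
        dp)
    dp0
  PySem.List.pyGetD dp (-1) 0

-- ===== PORT B =====
-- f(hat, mask) of Source B, recursion on the suffix owner[hat:] of the owner table
-- (hat index ↔ list suffix; the memo dict only caches these same values).
def pvF (full : Nat) : List (List Nat) → Nat → Int
  | [] => fun mask => if mask = full then 1 else 0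
  | ppl :: rest => fun mask =>
      let fr := pvF full rest
      PySem.Int.mod
        (ppl.foldl
          (fun total p => if (mask >>> p) &&& 1 = 0 then total + fr (mask ||| (1 <<< p)) else total)
          (fr mask))
        pvP

def numberWays_alt (hats : List (List Int)) : Int :=
  let n := hats.length
  let full := (1 <<< n) - 1
  let owner := pvOwner hats
  pvF full owner 0

-- ===== PRECONDITION & SPEC =====
-- Pre_ excludes exactly the inputs on which Python A raises IndexError
-- (a hat label outside [-41, 40] makes owner[j].append fail); B raises there too.
def Pre_numberWays (hats : List (List Int)) : Prop :=
  ∀ v ∈ hats, ∀ j ∈ v, -41 ≤ j ∧ j ≤ 40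
instance (hats : List (List Int)) : Decidable (Pre_numberWays hats) := by
  unfold Pre_numberWays; infer_instance

def pvWitness_numberWays : List (List Int) := [[3, 4], [4, 5], [5]]

def Spec_numberWays (hats : List (List Int)) (out : Int) : Prop := out = numberWays_alt hats
instance (hats : List (List Int)) (out : Int) : Decidable (Spec_numberWays hats out) := by unfold Spec_numberWays; infer_instance

-- ===== CLAIM (what is proved, stated in full; the proofs are below) =====
def Claim_equal_numberWays : Prop := ∀ (hats : List (List Int)), Dom_numberWays hats → Pre_numberWays hats → Spec_numberWays hats (numberWays hats)

-- ===== LEMMAS AND PROOFS =====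

-- proof-side helpers ----------------------------------------------------------
-- pointwise ("gather") form of A's per-hat update, and the sum of B's subcalls per hat
def pvHatSum (dp : List Int) (m : Nat) (ppl : List Nat) : Int :=
  ppl.foldl (fun acc j => if (m >>> j) &&& 1 = 1 then acc + dp.getD (m ^^^ (1 <<< j)) 0 else acc) 0

def pvG (N : Nat) (dp : List Int) (ppl : List Nat) : List Int :=
  (List.range N).map (fun m => PySem.Int.mod (dp.getD m 0 + pvHatSum dp m ppl) pvP)

def pvBInner (full : Nat) (L : List (List Nat)) (mask : Nat) (ppl : List Nat) : Int :=
  ppl.foldl (fun t p => if (mask >>> p) &&& 1 = 0 then t + pvF full L (mask ||| (1 <<< p)) else t) 0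

-- generic foldl helpers -------------------------------------------------------
theorem pv_foldl_inv {α β : Type} (P : α → Prop) (f : α → β → α)
    (h : ∀ a b, P a → P (f a b)) :
    ∀ (l : List β) (a : α), P a → P (l.foldl f a) := by
  intro l
  induction l with
  | nil => intro a ha; exact ha
  | cons x xs ih => intro a ha; exact ih (f a x) (h a x ha)

theorem pv_foldl_congr_inv {α β : Type} (P : α → Prop) (f g : α → β → α)
    (hP : ∀ a b, P a → P (f a b)) (hfg : ∀ a b, P a → f a b = g a b) :
    ∀ (l : List β) (a : α), P a → l.foldl f a = l.foldl g a := by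
  intro l
  induction l with
  | nil => intro a _; rfl
  | cons x xs ih =>
      intro a ha
      simp only [List.foldl_cons]
      rw [hfg a x ha]
      exact ih (g a x) (hfg a x ha ▸ hP a x ha)

theorem pv_foldl_range_getD {α β : Type} (g : α → β → α) (d : β) :
    ∀ (L : List β) (a : α),
      (List.range L.length).foldl (fun acc i => g acc (L.getD i d)) a = L.foldl g a := by
  intro L
  induction L with
  | nil => intro a; rfl
  | cons x xs ih =>
      intro a
      rw [List.length_cons, List.range_succ_eq_map]
      simp only [List.foldl_cons, List.foldl_map, List.getD_cons_zero, List.getD_cons_succ]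
      exact ih (g a x)

theorem pv_foldl_congr {α β : Type} (f g : α → β → α) (h : ∀ a b, f a b = g a b) :
    ∀ (l : List β) (a : α), l.foldl f a = l.foldl g a := by
  intro l
  induction l with
  | nil => intro a; rfl
  | cons x xs ih => intro a; simp only [List.foldl_cons, h a x]; exact ih (g a x)

theorem pv_appendAt_len (ow : List (List Nat)) (j : Int) (i : Nat) :
    (pvAppendAt ow j i).length = ow.length := by
  unfold pvAppendAt
  dsimp only
  split <;> split <;> simp

-- bit lemmas ------------------------------------------------------------------
theorem pv_and_pow_eq_zero_iff (s j : Nat) : s &&& 2 ^ j = 0 ↔ s.testBit j = false := by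
  rw [Nat.and_two_pow]
  rcases h : s.testBit j
  · simp
  · simp [Nat.pow_eq_zero]

theorem pv_or_xor_cancel (s j : Nat) (hs : s.testBit j = false) : (s ||| 2 ^ j) ^^^ 2 ^ j = s := by
  apply Nat.eq_of_testBit_eq
  intro k
  by_cases hk : k = j
  · subst hk; simp [Nat.testBit_xor, Nat.testBit_or, Nat.testBit_two_pow_self, hs]
  · simp [Nat.testBit_xor, Nat.testBit_or, Ne.symm hk]

theorem pv_xor_testBit_false (t j : Nat) (ht : t.testBit j = true) :
    (t ^^^ 2 ^ j).testBit j = false := by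
  simp [Nat.testBit_xor, ht, Nat.testBit_two_pow_self]

theorem pv_xor_testBit_true (t j : Nat) (ht : t.testBit j = false) :
    (t ^^^ 2 ^ j).testBit j = true := by
  simp [Nat.testBit_xor, ht, Nat.testBit_two_pow_self]

theorem pv_xor_or_cancel (t j : Nat) (ht : t.testBit j = true) : (t ^^^ 2 ^ j) ||| 2 ^ j = t := by
  apply Nat.eq_of_testBit_eq
  intro k
  by_cases hk : k = j
  · subst hk; simp [Nat.testBit_or, Nat.testBit_xor, Nat.testBit_two_pow_self, ht]
  · simp [Nat.testBit_or, Nat.testBit_xor, Ne.symm hk]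

theorem pv_or_testBit_true (s j : Nat) : (s ||| 2 ^ j).testBit j = true := by
  simp [Nat.testBit_or, Nat.testBit_two_pow_self]

theorem pv_testBit_lt (t n j : Nat) (h : t < 2 ^ n) (ht : t.testBit j = true) : j < n := by
  by_contra hj
  have : t.testBit j = false := Nat.testBit_lt_two_pow (lt_of_lt_of_le h (Nat.pow_le_pow_right (by norm_num) (Nat.le_of_not_lt hj)))
  simp [this] at ht

theorem pv_xor_lt (t n j : Nat) (h : t < 2 ^ n) (hj : j < n) : t ^^^ 2 ^ j < 2 ^ n :=
  Nat.xor_lt_two_pow h (Nat.pow_lt_pow_right (by norm_num) hj)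

theorem pv_cond_testBit (m j : Nat) : ((m >>> j) &&& 1 = 1) ↔ m.testBit j = true := by
  simp [Nat.testBit, Nat.and_one_is_mod, Nat.shiftRight_eq_div_pow]

theorem pv_cond_testBit_false (m j : Nat) : ((m >>> j) &&& 1 = 0) ↔ m.testBit j = false := by
  have h := pv_cond_testBit m j
  have hle : (m >>> j) &&& 1 ≤ 1 := Nat.and_le_right
  constructor
  · intro h0
    cases hb : m.testBit j
    · rfl
    · have := h.mpr hb; omega
  · intro hb
    by_contra h0
    have h1 : (m >>> j) &&& 1 = 1 := by omega
    simp [h.mp h1] at hb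

-- mod facts -------------------------------------------------------------------
theorem pvP_pos : (0 : Int) < pvP := by norm_num [pvP]

theorem pv_mod_eq (x : Int) : PySem.Int.mod x pvP = x % pvP :=
  PySem.Int.mod_eq_emod_of_pos pvP_pos

theorem pv_mod_bounds (x : Int) : 0 ≤ PySem.Int.mod x pvP ∧ PySem.Int.mod x pvP < pvP := by
  rw [pv_mod_eq]
  exact ⟨Int.emod_nonneg x (by norm_num [pvP]), Int.emod_lt_of_pos x pvP_pos⟩

theorem pv_mod_id (x : Int) (h0 : 0 ≤ x) (h1 : x < pvP) : PySem.Int.mod x pvP = x := by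
  rw [pv_mod_eq]; exact Int.emod_eq_of_lt h0 h1

theorem pvP_natCast : ((1000000007 : Nat) : Int) = pvP := by norm_num [pvP]

theorem pv_mod_cast (x : Int) :
    ((PySem.Int.mod x pvP : Int) : ZMod 1000000007) = ((x : Int) : ZMod 1000000007) := by
  rw [pv_mod_eq, ← pvP_natCast]
  exact ZMod.intCast_mod x 1000000007

theorem pv_cast_eq_of_bounds (a b : Int)
    (h : ((a : Int) : ZMod 1000000007) = ((b : Int) : ZMod 1000000007))
    (ha0 : 0 ≤ a) (ha1 : a < pvP) (hb0 : 0 ≤ b) (hb1 : b < pvP) : a = b := by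
  rw [ZMod.intCast_eq_intCast_iff'] at h
  rw [pvP_natCast] at h
  rwa [Int.emod_eq_of_lt ha0 ha1, Int.emod_eq_of_lt hb0 hb1] at h

-- scatter characterisation ----------------------------------------------------
theorem pv_scat_len (dp : List Int) (bit : Nat) :
    ∀ (S : List Nat) (ndp : List Int), (S.foldl (pvScatStep dp bit) ndp).length = ndp.length := by
  intro S
  induction S with
  | nil => intro ndp; rfl
  | cons s S ih =>
      intro ndp
      simp only [List.foldl_cons]
      rw [ih]
      unfold pvScatStep
      split <;> simp

theorem pv_scat_fold (dp : List Int) (j : Nat) :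
    ∀ (S : List Nat), S.Nodup → ∀ (ndp : List Int) (t : Nat), t < ndp.length →
      (S.foldl (pvScatStep dp (2 ^ j)) ndp).getD t 0 =
        if t.testBit j = true ∧ (t ^^^ 2 ^ j) ∈ S then
          PySem.Int.mod (ndp.getD t 0 + dp.getD (t ^^^ 2 ^ j) 0) pvP
        else ndp.getD t 0 := by
  intro S
  induction S with
  | nil => intro _ ndp t ht; simp
  | cons s S ih =>
      intro hnd ndp t ht
      have hndS : S.Nodup := (List.nodup_cons.mp hnd).2
      have hsS : s ∉ S := (List.nodup_cons.mp hnd).1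
      simp only [List.foldl_cons]
      by_cases hb : s &&& 2 ^ j = 0
      · have hsbit : s.testBit j = false := (pv_and_pow_eq_zero_iff s j).mp hb
        set u := s ||| 2 ^ j with hu
        have hhead : pvScatStep dp (2 ^ j) ndp s =
            ndp.set u (PySem.Int.mod (ndp.getD u 0 + dp.getD s 0) pvP) := by
          unfold pvScatStep; rw [if_pos hb]
        rw [hhead]
        have hlen' : t < (ndp.set u (PySem.Int.mod (ndp.getD u 0 + dp.getD s 0) pvP)).length := by
          simpa using ht
        rw [ih hndS _ t hlen']
        by_cases hcase : t.testBit j = true ∧ t ^^^ 2 ^ j = s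
        · obtain ⟨htb, hts⟩ := hcase
          have hut : u = t := by rw [hu, ← hts]; exact pv_xor_or_cancel t j htb
          have hmem : t ^^^ 2 ^ j ∉ S := by rw [hts]; exact hsS
          rw [if_neg (by intro h; exact hmem h.2)]
          rw [hut]
          rw [List.getD_eq_getElem?_getD, List.getElem?_set_self (by simpa using ht)]
          simp only [Option.getD_some]
          rw [if_pos ⟨htb, by rw [hts]; exact List.mem_cons_self⟩, hts]
        · have hne : t ≠ u := by
            intro he
            have htb : t.testBit j = true := by rw [he, hu]; exact pv_or_testBit_true s j
            have : t ^^^ 2 ^ j = s := by rw [he, hu]; exact pv_or_xor_cancel s j hsbit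
            exact hcase ⟨htb, this⟩
          have hset : (ndp.set u (PySem.Int.mod (ndp.getD u 0 + dp.getD s 0) pvP)).getD t 0 = ndp.getD t 0 := by
            rw [List.getD_eq_getElem?_getD, List.getElem?_set_ne (by omega), ← List.getD_eq_getElem?_getD]
          rw [hset]
          by_cases htb : t.testBit j = true
          · have hts : t ^^^ 2 ^ j ≠ s := fun h => hcase ⟨htb, h⟩
            simp [htb, hts]
          · simp [htb]
      · have hhead : pvScatStep dp (2 ^ j) ndp s = ndp := by
          unfold pvScatStep; rw [if_neg hb]
        rw [hhead, ih hndS ndp t ht]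
        have : t.testBit j = true → t ^^^ 2 ^ j ≠ s := by
          intro htb he
          exact hb (he ▸ (pv_and_pow_eq_zero_iff _ j).mpr (pv_xor_testBit_false t j htb))
        by_cases htb : t.testBit j = true
        · simp [htb, this htb]
        · simp [htb]

theorem pv_scatJ_getD (dp ndp : List Int) (n j t : Nat)
    (hlen : ndp.length = 2 ^ n) (ht : t < 2 ^ n) :
    ((List.range (2 ^ n)).foldl (pvScatStep dp (2 ^ j)) ndp).getD t 0 =
      if t.testBit j = true then
        PySem.Int.mod (ndp.getD t 0 + dp.getD (t ^^^ 2 ^ j) 0) pvP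
      else ndp.getD t 0 := by
  rw [pv_scat_fold dp j (List.range (2 ^ n)) (List.nodup_range) ndp t (by omega)]
  by_cases htb : t.testBit j = true
  · have hj : j < n := pv_testBit_lt t n j ht htb
    have : t ^^^ 2 ^ j ∈ List.range (2 ^ n) := List.mem_range.mpr (pv_xor_lt t n j ht hj)
    simp [htb, this]
  · simp [htb]

-- pointwise value of A's per-hat fold ----------------------------------------
theorem pv_fold_ppl_getD (dp : List Int) (n t : Nat) (ht : t < 2 ^ n) :
    ∀ (ppl : List Nat) (ndp : List Int), ndp.length = 2 ^ n →
      ((ppl.foldl (fun ndp j => (List.range (2 ^ n)).foldl (pvScatStep dp (2 ^ j)) ndp) ndp).getD t 0) =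
        ppl.foldl
          (fun v j => if t.testBit j = true then PySem.Int.mod (v + dp.getD (t ^^^ 2 ^ j) 0) pvP else v)
          (ndp.getD t 0) := by
  intro ppl
  induction ppl with
  | nil => intro ndp _; rfl
  | cons j ppl ih =>
      intro ndp hlen
      simp only [List.foldl_cons]
      rw [ih _ (by rw [pv_scat_len]; exact hlen)]
      rw [pv_scatJ_getD dp ndp n j t hlen ht]

-- pvHatSum as head-contribution plus rest ------------------------------------
theorem pv_hatSum_acc (dp : List Int) (t : Nat) :
    ∀ (ppl : List Nat) (a : Int),
      ppl.foldl (fun acc j => if (t >>> j) &&& 1 = 1 then acc + dp.getD (t ^^^ (1 <<< j)) 0 else acc) a =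
        a + pvHatSum dp t ppl := by
  intro ppl
  induction ppl with
  | nil => intro a; simp [pvHatSum]
  | cons j ppl ih =>
      intro a
      simp only [pvHatSum, List.foldl_cons]
      by_cases hc : (t >>> j) &&& 1 = 1
      · rw [if_pos hc, if_pos hc, ih, ih]
        ring
      · rw [if_neg hc, if_neg hc, ih]
        rfl

theorem pv_hatSum_cons (dp : List Int) (t j : Nat) (ppl : List Nat) :
    pvHatSum dp t (j :: ppl) =
      (if (t >>> j) &&& 1 = 1 then dp.getD (t ^^^ (1 <<< j)) 0 else 0) + pvHatSum dp t ppl := by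
  unfold pvHatSum
  simp only [List.foldl_cons]
  rw [pv_hatSum_acc]
  split <;> simp [pvHatSum]

-- value-level fold equals mod of sum ------------------------------------------
theorem pv_fold_val (dp : List Int) (t : Nat) :
    ∀ (ppl : List Nat) (v : Int), 0 ≤ v → v < pvP →
      ppl.foldl
          (fun v j => if t.testBit j = true then PySem.Int.mod (v + dp.getD (t ^^^ 2 ^ j) 0) pvP else v)
          v =
        PySem.Int.mod (v + pvHatSum dp t ppl) pvP := by
  intro ppl
  induction ppl with
  | nil => intro v h0 h1; simp [pvHatSum, pv_mod_id v h0 h1]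
  | cons j ppl ih =>
      intro v h0 h1
      have hbit : (1 : Nat) <<< j = 2 ^ j := by simp [Nat.shiftLeft_eq]
      have hsum := pv_hatSum_cons dp t j ppl
      simp only [List.foldl_cons]
      by_cases htb : t.testBit j = true
      · have hc : (t >>> j) &&& 1 = 1 := (pv_cond_testBit t j).mpr htb
        rw [if_pos htb]
        obtain ⟨hm0, hm1⟩ := pv_mod_bounds (v + dp.getD (t ^^^ 2 ^ j) 0)
        rw [ih _ hm0 hm1, hsum, if_pos hc]
        rw [pv_mod_eq, pv_mod_eq, pv_mod_eq, Int.emod_add_emod, hbit]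
        ring_nf
      · have hc : ¬ ((t >>> j) &&& 1 = 1) := fun h => htb ((pv_cond_testBit t j).mp h)
        rw [if_neg htb, ih v h0 h1, hsum, if_neg hc]
        ring_nf

-- invariant --------------------------------------------------------------------
def pvInv (n : Nat) (dp : List Int) : Prop :=
  dp.length = 2 ^ n ∧ ∀ x ∈ dp, 0 ≤ x ∧ x < pvP

theorem pv_step_eq (n : Nat) (dp : List Int) (ppl : List Nat) (h : pvInv n dp) :
    ppl.foldl (fun ndp j => (List.range (2 ^ n)).foldl (pvScatStep dp (2 ^ j)) ndp) dp =
      pvG (2 ^ n) dp ppl := by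
  obtain ⟨hlen, hbd⟩ := h
  have hlenA : (ppl.foldl (fun ndp j => (List.range (2 ^ n)).foldl (pvScatStep dp (2 ^ j)) ndp) dp).length = 2 ^ n := by
    have := pv_foldl_inv (fun (l : List Int) => l.length = 2 ^ n)
      (fun ndp j => (List.range (2 ^ n)).foldl (pvScatStep dp (2 ^ j)) ndp)
      (fun a b ha => by simpa only [pv_scat_len] using ha) ppl dp hlen
    exact this
  apply List.ext_getElem
  · rw [hlenA]; simp [pvG]
  · intro t h1 h2
    have ht : t < 2 ^ n := by rwa [hlenA] at h1
    have hgetA : (ppl.foldl (fun ndp j => (List.range (2 ^ n)).foldl (pvScatStep dp (2 ^ j)) ndp) dp)[t] =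
        (ppl.foldl (fun ndp j => (List.range (2 ^ n)).foldl (pvScatStep dp (2 ^ j)) ndp) dp).getD t 0 := by
      rw [List.getD_eq_getElem?_getD, List.getElem?_eq_getElem h1]; rfl
    rw [hgetA, pv_fold_ppl_getD dp n t ht ppl dp hlen]
    have hvmem : dp.getD t 0 ∈ dp := by
      rw [List.getD_eq_getElem?_getD, List.getElem?_eq_getElem (by omega : t < dp.length)]
      exact List.getElem_mem _
    obtain ⟨h0, h1'⟩ := hbd _ hvmem
    rw [pv_fold_val dp t ppl (dp.getD t 0) h0 h1']
    simp [pvG, List.getElem_map, List.getElem_range]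

theorem pv_step_inv (n : Nat) (dp : List Int) (ppl : List Nat) :
    pvInv n (pvG (2 ^ n) dp ppl) := by
  constructor
  · simp [pvG]
  · intro x hx
    obtain ⟨m, _, rfl⟩ := List.mem_map.mp hx
    exact pv_mod_bounds _

-- owner length -----------------------------------------------------------------
theorem pv_owner_len (hats : List (List Int)) : (pvOwner hats).length = 41 := by
  unfold pvOwner
  have : ∀ (l : List (Int × List Int)) (ow : List (List Nat)), ow.length = 41 →
      (l.foldl (fun ow iv => iv.2.foldl (fun ow j => pvAppendAt ow j iv.1.toNat) ow) ow).length = 41 := by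
    intro l
    induction l with
    | nil => intro ow h; exact h
    | cons x xs ih =>
        intro ow h
        apply ih
        have : ∀ (v : List Int) (ow : List (List Nat)), ow.length = 41 →
            (v.foldl (fun ow j => pvAppendAt ow j x.1.toNat) ow).length = 41 := by
          intro v
          induction v with
          | nil => intro ow h; exact h
          | cons y ys ih2 =>
              intro ow h
              apply ih2
              rw [pv_appendAt_len]
              exact h
        exact this x.2 ow h
  exact this _ _ (by simp)

-- every person index stored in owner is < hats.length --------------------------
theorem pv_modify_forall {α : Type} (Q : α → Prop) (f : α → α)
    (hf : ∀ a, Q a → Q (f a)) :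
    ∀ (l : List α) (k : Nat), (∀ a ∈ l, Q a) → ∀ a ∈ l.modify k f, Q a := by
  intro l k h a ha
  obtain ⟨i, hi, rfl⟩ := List.mem_iff_getElem.mp ha
  rw [List.getElem_modify]
  split
  · exact hf _ (h _ (List.getElem_mem _))
  · exact h _ (List.getElem_mem _)

theorem pv_appendAt_forall (n : Nat) (ow : List (List Nat)) (j : Int) (i : Nat) (hi : i < n)
    (h : ∀ l ∈ ow, ∀ p ∈ l, p < n) : ∀ l ∈ pvAppendAt ow j i, ∀ p ∈ l, p < n := by
  unfold pvAppendAt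
  dsimp only
  split <;> split
  all_goals first
    | exact h
    | exact pv_modify_forall (fun l => ∀ p ∈ l, p < n) (fun l => l ++ [i])
        (fun l hl p hp => by
          rcases List.mem_append.mp hp with h1 | h1
          · exact hl p h1
          · rw [List.mem_singleton.mp h1]; exact hi) ow _ h

theorem pv_owner_lt (hats : List (List Int)) :
    ∀ l ∈ pvOwner hats, ∀ p ∈ l, p < hats.length := by
  unfold pvOwner
  have main : ∀ (l : List (Int × List Int)), (∀ iv ∈ l, iv.1.toNat < hats.length) →
      ∀ (ow : List (List Nat)), (∀ l' ∈ ow, ∀ p ∈ l', p < hats.length) →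
      ∀ l' ∈ l.foldl (fun ow iv => iv.2.foldl (fun ow j => pvAppendAt ow j iv.1.toNat) ow) ow,
        ∀ p ∈ l', p < hats.length := by
    intro l
    induction l with
    | nil => intro _ ow h; exact h
    | cons x xs ih =>
        intro hidx ow how
        simp only [List.foldl_cons]
        apply ih (fun iv hiv => hidx iv (List.mem_cons_of_mem x hiv))
        have hx : x.1.toNat < hats.length := hidx x List.mem_cons_self
        have : ∀ (v : List Int) (ow : List (List Nat)), (∀ l' ∈ ow, ∀ p ∈ l', p < hats.length) →
            ∀ l' ∈ v.foldl (fun ow j => pvAppendAt ow j x.1.toNat) ow, ∀ p ∈ l', p < hats.length := by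
          intro v
          induction v with
          | nil => intro ow h; exact h
          | cons y ys ih2 =>
              intro ow h
              exact ih2 _ (pv_appendAt_forall hats.length ow y x.1.toNat hx h)
        exact this x.2 ow how
  apply main
  · intro iv hiv
    obtain ⟨k, hk, rfl⟩ := (PySem.List.mem_enumerate_iff _ _ _).mp hiv
    simpa using hk
  · intro l' hl'
    rw [List.eq_of_mem_replicate hl']
    simp

-- B-side: inner fold as accumulator plus pvBInner ------------------------------
theorem pv_bInner_acc (full : Nat) (L : List (List Nat)) (mask : Nat) :
    ∀ (ppl : List Nat) (a : Int),
      ppl.foldl (fun t p => if (mask >>> p) &&& 1 = 0 then t + pvF full L (mask ||| (1 <<< p)) else t) a =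
        a + pvBInner full L mask ppl := by
  intro ppl
  induction ppl with
  | nil => intro a; simp [pvBInner]
  | cons j ppl ih =>
      intro a
      simp only [pvBInner, List.foldl_cons]
      by_cases hc : (mask >>> j) &&& 1 = 0
      · rw [if_pos hc, if_pos hc, ih, ih]
        ring
      · rw [if_neg hc, if_neg hc, ih]
        rfl

theorem pv_bInner_cons (full : Nat) (L : List (List Nat)) (mask j : Nat) (ppl : List Nat) :
    pvBInner full L mask (j :: ppl) =
      (if (mask >>> j) &&& 1 = 0 then pvF full L (mask ||| (1 <<< j)) else 0) + pvBInner full L mask ppl := by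
  unfold pvBInner
  simp only [List.foldl_cons]
  rw [pv_bInner_acc]
  split <;> simp [pvBInner]

theorem pvF_cons (full : Nat) (ppl : List Nat) (L : List (List Nat)) (mask : Nat) :
    pvF full (ppl :: L) mask =
      PySem.Int.mod (pvF full L mask + pvBInner full L mask ppl) pvP := by
  simp only [pvF]
  rw [pv_bInner_acc]

theorem pvF_cons_bounds (full : Nat) (ppl : List Nat) (L : List (List Nat)) (mask : Nat) :
    0 ≤ pvF full (ppl :: L) mask ∧ pvF full (ppl :: L) mask < pvP := by
  rw [pvF_cons]
  exact pv_mod_bounds _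

-- single-bit sum swap ----------------------------------------------------------
theorem pv_swap_one (dp : List Int) (F : Nat → Int) (n j : Nat) (hj : j < n) :
    ∑ t ∈ Finset.range (2 ^ n), (if t.testBit j = true then dp.getD (t ^^^ 2 ^ j) 0 else 0) * F t =
    ∑ s ∈ Finset.range (2 ^ n), dp.getD s 0 * (if s.testBit j = false then F (s ||| 2 ^ j) else 0) := by
  apply Finset.sum_nbij' (fun t => t ^^^ 2 ^ j) (fun s => s ^^^ 2 ^ j)
  · intro t ht
    exact Finset.mem_range.mpr (pv_xor_lt t n j (Finset.mem_range.mp ht) hj)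
  · intro s hs
    exact Finset.mem_range.mpr (pv_xor_lt s n j (Finset.mem_range.mp hs) hj)
  · intro t _; simp
  · intro s _; simp
  · intro t _
    by_cases htb : t.testBit j = true
    · rw [if_pos htb, if_pos (pv_xor_testBit_false t j htb), pv_xor_or_cancel t j htb]
    · have hf : t.testBit j = false := by simpa using htb
      rw [if_neg htb, if_neg (by simp [pv_xor_testBit_true t j hf])]
      ring

-- sum swap over a whole owner group --------------------------------------------
theorem pv_swap (dp : List Int) (full : Nat) (L : List (List Nat)) (n : Nat) :
    ∀ (ppl : List Nat), (∀ j ∈ ppl, j < n) →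
      ∑ t ∈ Finset.range (2 ^ n), pvHatSum dp t ppl * pvF full L t =
      ∑ s ∈ Finset.range (2 ^ n), dp.getD s 0 * pvBInner full L s ppl := by
  intro ppl
  induction ppl with
  | nil => intro _; simp [pvHatSum, pvBInner]
  | cons j ppl ih =>
      intro hlt
      have hj : j < n := hlt j List.mem_cons_self
      have hrest : ∀ p ∈ ppl, p < n := fun p hp => hlt p (List.mem_cons_of_mem j hp)
      have hbit : (1 : Nat) <<< j = 2 ^ j := by simp [Nat.shiftLeft_eq]
      calc ∑ t ∈ Finset.range (2 ^ n), pvHatSum dp t (j :: ppl) * pvF full L t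
          = ∑ t ∈ Finset.range (2 ^ n),
              ((if t.testBit j = true then dp.getD (t ^^^ 2 ^ j) 0 else 0) * pvF full L t
                + pvHatSum dp t ppl * pvF full L t) := by
            apply Finset.sum_congr rfl
            intro t _
            rw [pv_hatSum_cons]
            have he : (if (t >>> j) &&& 1 = 1 then dp.getD (t ^^^ (1 <<< j)) 0 else 0) =
                (if t.testBit j = true then dp.getD (t ^^^ 2 ^ j) 0 else 0) := by
              rw [hbit]
              by_cases hc : t.testBit j = true
              · rw [if_pos ((pv_cond_testBit t j).mpr hc), if_pos hc]
              · rw [if_neg (fun h => hc ((pv_cond_testBit t j).mp h)), if_neg hc]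
            rw [he]
            ring
        _ = ∑ s ∈ Finset.range (2 ^ n), dp.getD s 0 *
              ((if s.testBit j = false then pvF full L (s ||| 2 ^ j) else 0) + pvBInner full L s ppl) := by
            rw [Finset.sum_add_distrib, pv_swap_one dp (pvF full L) n j hj, ih hrest,
              ← Finset.sum_add_distrib]
            apply Finset.sum_congr rfl
            intro s _
            ring
        _ = ∑ s ∈ Finset.range (2 ^ n), dp.getD s 0 * pvBInner full L s (j :: ppl) := by
            apply Finset.sum_congr rfl
            intro s _
            rw [pv_bInner_cons]
            have he : (if (s >>> j) &&& 1 = 0 then pvF full L (s ||| (1 <<< j)) else 0) =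
                (if s.testBit j = false then pvF full L (s ||| 2 ^ j) else 0) := by
              rw [hbit]
              by_cases hc : s.testBit j = false
              · rw [if_pos ((pv_cond_testBit_false s j).mpr hc), if_pos hc]
              · rw [if_neg (fun h => hc ((pv_cond_testBit_false s j).mp h)), if_neg hc]
            rw [he]

-- the Int-level per-hat identity ------------------------------------------------
theorem pv_int_step (n full : Nat) (L : List (List Nat)) (dp : List Int)
    (ppl : List Nat) (h : ∀ j ∈ ppl, j < n) :
    ∑ t ∈ Finset.range (2 ^ n), (dp.getD t 0 + pvHatSum dp t ppl) * pvF full L t =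
    ∑ s ∈ Finset.range (2 ^ n), dp.getD s 0 * (pvF full L s + pvBInner full L s ppl) := by
  have e1 : ∑ t ∈ Finset.range (2 ^ n), (dp.getD t 0 + pvHatSum dp t ppl) * pvF full L t =
      ∑ t ∈ Finset.range (2 ^ n), (dp.getD t 0 * pvF full L t + pvHatSum dp t ppl * pvF full L t) :=
    Finset.sum_congr rfl (fun t _ => by ring)
  rw [e1, Finset.sum_add_distrib, pv_swap dp full L n ppl h, ← Finset.sum_add_distrib]
  exact Finset.sum_congr rfl (fun s _ => by ring)

-- cast a pointwise-congruent sum ------------------------------------------------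
theorem pv_cast_sum_congr (s : Finset Nat) (f g : Nat → Int)
    (h : ∀ x ∈ s, ((f x : Int) : ZMod 1000000007) = ((g x : Int) : ZMod 1000000007)) :
    (((∑ x ∈ s, f x : Int)) : ZMod 1000000007) = ((∑ x ∈ s, g x : Int) : ZMod 1000000007) := by
  push_cast
  exact Finset.sum_congr rfl h

-- main: forward fold of gather steps vs backward recursion, mod p ----------------
theorem pv_main_cast (n : Nat) :
    ∀ (L : List (List Nat)), (∀ ppl ∈ L, ∀ j ∈ ppl, j < n) →
      ∀ (dp : List Int), dp.length = 2 ^ n →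
        (((L.foldl (pvG (2 ^ n)) dp).getD (2 ^ n - 1) 0 : Int) : ZMod 1000000007) =
          ((∑ m ∈ Finset.range (2 ^ n), dp.getD m 0 * pvF (2 ^ n - 1) L m : Int) : ZMod 1000000007) := by
  intro L
  induction L with
  | nil =>
      intro _ dp _
      simp only [List.foldl_nil, pvF]
      have hfull : 2 ^ n - 1 ∈ Finset.range (2 ^ n) := by
        have : 1 ≤ 2 ^ n := Nat.one_le_two_pow
        exact Finset.mem_range.mpr (by omega)
      have hpt : ∀ m ∈ Finset.range (2 ^ n), dp.getD m 0 * (if m = 2 ^ n - 1 then (1 : Int) else 0) =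
          (if m = 2 ^ n - 1 then dp.getD m 0 else 0) := by
        intro m _
        split <;> simp
      have e : ∑ m ∈ Finset.range (2 ^ n), dp.getD m 0 * (if m = 2 ^ n - 1 then (1 : Int) else 0) =
          dp.getD (2 ^ n - 1) 0 := by
        rw [Finset.sum_congr rfl hpt,
          Finset.sum_ite_eq' (Finset.range (2 ^ n)) (2 ^ n - 1) (fun m => dp.getD m 0), if_pos hfull]
      rw [e]
  | cons ppl L ih =>
      intro hlt dp hlen
      have hppl : ∀ j ∈ ppl, j < n := hlt ppl List.mem_cons_self
      have hL : ∀ q ∈ L, ∀ j ∈ q, j < n := fun q hq => hlt q (List.mem_cons_of_mem ppl hq)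
      simp only [List.foldl_cons]
      have hlen' : (pvG (2 ^ n) dp ppl).length = 2 ^ n := by simp [pvG]
      rw [ih hL (pvG (2 ^ n) dp ppl) hlen']
      have hget : ∀ t ∈ Finset.range (2 ^ n),
          (pvG (2 ^ n) dp ppl).getD t 0 = PySem.Int.mod (dp.getD t 0 + pvHatSum dp t ppl) pvP := by
        intro t ht
        have ht' : t < 2 ^ n := Finset.mem_range.mp ht
        unfold pvG
        rw [List.getD_eq_getElem?_getD, List.getElem?_map, List.getElem?_range ht']
        rfl
      calc ((∑ m ∈ Finset.range (2 ^ n), (pvG (2 ^ n) dp ppl).getD m 0 * pvF (2 ^ n - 1) L m : Int) : ZMod 1000000007)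
          = ((∑ m ∈ Finset.range (2 ^ n), (dp.getD m 0 + pvHatSum dp m ppl) * pvF (2 ^ n - 1) L m : Int) : ZMod 1000000007) := by
            apply pv_cast_sum_congr
            intro t ht
            rw [hget t ht]
            push_cast
            rw [pv_mod_cast]
            push_cast
            ring
        _ = ((∑ s ∈ Finset.range (2 ^ n), dp.getD s 0 * (pvF (2 ^ n - 1) L s + pvBInner (2 ^ n - 1) L s ppl) : Int) : ZMod 1000000007) := by
            rw [pv_int_step n (2 ^ n - 1) L dp ppl hppl]
        _ = ((∑ s ∈ Finset.range (2 ^ n), dp.getD s 0 * pvF (2 ^ n - 1) (ppl :: L) s : Int) : ZMod 1000000007) := by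
            apply pv_cast_sum_congr
            intro s _
            rw [pvF_cons]
            push_cast
            rw [pv_mod_cast]
            push_cast
            ring

-- sum against the initial dp collapses to f at mask 0 ---------------------------
theorem pv_sum_e0 (N : Nat) (hN : 0 < N) (F : Nat → Int) :
    ∑ m ∈ Finset.range N, ((1 : Int) :: List.replicate (N - 1) 0).getD m 0 * F m = F 0 := by
  have hget : ∀ m : Nat, ((1 : Int) :: List.replicate (N - 1) 0).getD m 0 =
      if m = 0 then 1 else 0 := by
    intro m
    cases m with
    | zero => simp
    | succ k =>
        simp only [List.getD_cons_succ]
        rw [List.getD_eq_getElem?_getD, List.getElem?_replicate]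
        split <;> simp
  have hpt : ∀ m ∈ Finset.range N, ((1 : Int) :: List.replicate (N - 1) 0).getD m 0 * F m =
      (if m = 0 then F m else 0) := by
    intro m _
    rw [hget m]
    split <;> simp
  rw [Finset.sum_congr rfl hpt, Finset.sum_ite_eq' (Finset.range N) 0 F,
    if_pos (Finset.mem_range.mpr hN)]

-- the two ports agree -----------------------------------------------------------
theorem pv_main (hats : List (List Int)) : numberWays hats = numberWays_alt hats := by
  unfold numberWays numberWays_alt
  dsimp only
  have hN : (1 : Nat) <<< hats.length = 2 ^ hats.length := by simp [Nat.shiftLeft_eq]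
  set n := hats.length with hn
  have hpos : 1 ≤ 2 ^ n := Nat.one_le_two_pow
  -- initial dp list
  have hdp0 : (List.replicate (1 <<< n) (0 : Int)).set 0 1 =
      ((1 : Int) :: List.replicate (1 <<< n - 1) 0) := by
    rw [hN]
    have h1 : 2 ^ n = (2 ^ n - 1) + 1 := by omega
    conv_lhs => rw [h1]
    rw [List.replicate_succ, List.set_cons_zero]
  rw [hdp0]
  have hscat : ∀ (dp ndp : List Int) (j : Nat),
      (List.range (1 <<< n)).foldl (pvScatStep dp (1 <<< j)) ndp =
      (List.range (2 ^ n)).foldl (pvScatStep dp (2 ^ j)) ndp := by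
    intro dp ndp j
    rw [hN]
    have : (1 : Nat) <<< j = 2 ^ j := by simp [Nat.shiftLeft_eq]
    rw [this]
  -- range-41 fold over owner.getD = fold over owner
  have hrange : ∀ (a : List Int),
      (List.range 41).foldl
        (fun dp i => ((pvOwner hats).getD i []).foldl
          (fun ndp j => (List.range (1 <<< n)).foldl (pvScatStep dp (1 <<< j)) ndp) dp) a =
      (pvOwner hats).foldl
        (fun dp ppl => ppl.foldl
          (fun ndp j => (List.range (1 <<< n)).foldl (pvScatStep dp (1 <<< j)) ndp) dp) a := by
    intro a
    have h41 : (41 : Nat) = (pvOwner hats).length := (pv_owner_len hats).symm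
    rw [h41]
    exact pv_foldl_range_getD
      (fun dp ppl => ppl.foldl (fun ndp j => (List.range (1 <<< n)).foldl (pvScatStep dp (1 <<< j)) ndp) dp)
      [] (pvOwner hats) a
  rw [hrange]
  have hinit : pvInv n ((1 : Int) :: List.replicate (1 <<< n - 1) 0) := by
    constructor
    · simp [hN]; omega
    · intro x hx
      rcases List.mem_cons.mp hx with h | h
      · subst h; norm_num [pvP]
      · rw [List.eq_of_mem_replicate h]; norm_num [pvP]
  -- A's fold = fold of pvG
  have hfold := pv_foldl_congr_inv (pvInv n)
    (fun dp ppl => ppl.foldl (fun ndp j => (List.range (1 <<< n)).foldl (pvScatStep dp (1 <<< j)) ndp) dp)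
    (fun dp ppl => pvG (2 ^ n) dp ppl)
    (fun dp ppl h => by
      dsimp only
      have e1 : ppl.foldl (fun ndp j => (List.range (1 <<< n)).foldl (pvScatStep dp (1 <<< j)) ndp) dp =
          ppl.foldl (fun ndp j => (List.range (2 ^ n)).foldl (pvScatStep dp (2 ^ j)) ndp) dp :=
        pv_foldl_congr _ _ (fun a b => hscat dp a b) ppl dp
      rw [e1, pv_step_eq n dp ppl h]
      exact pv_step_inv n dp ppl)
    (fun dp ppl h => by
      dsimp only
      have e1 : ppl.foldl (fun ndp j => (List.range (1 <<< n)).foldl (pvScatStep dp (1 <<< j)) ndp) dp =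
          ppl.foldl (fun ndp j => (List.range (2 ^ n)).foldl (pvScatStep dp (2 ^ j)) ndp) dp :=
        pv_foldl_congr _ _ (fun a b => hscat dp a b) ppl dp
      rw [e1, pv_step_eq n dp ppl h])
    (pvOwner hats) _ hinit
  rw [hfold]
  set e0 : List Int := (1 : Int) :: List.replicate (1 <<< n - 1) 0 with he0
  have he0' : e0 = (1 : Int) :: List.replicate (2 ^ n - 1) 0 := by rw [he0, hN]
  set Afin := (pvOwner hats).foldl (fun dp ppl => pvG (2 ^ n) dp ppl) e0 with hA
  -- final list satisfies the invariant
  have hAinv : pvInv n Afin := by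
    rw [hA]
    exact pv_foldl_inv (pvInv n) (fun dp ppl => pvG (2 ^ n) dp ppl)
      (fun dp ppl _ => pv_step_inv n dp ppl) (pvOwner hats) e0 hinit
  obtain ⟨hAlen, hAbd⟩ := hAinv
  have hAne : Afin ≠ [] := by
    intro h
    rw [h] at hAlen
    simp at hAlen
    omega
  -- A's result: dp[-1] = getD (2^n - 1)
  have hAval : PySem.List.pyGetD Afin (-1) 0 = Afin.getD (2 ^ n - 1) 0 := by
    rw [PySem.List.pyGetD_neg_one Afin 0 hAne]
    rw [List.getLast_eq_getElem]
    rw [List.getD_eq_getElem?_getD, List.getElem?_eq_getElem (by omega : 2 ^ n - 1 < Afin.length)]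
    simp [hAlen]
  rw [hAval]
  -- B's full mask
  have hfull : (1 <<< n - 1 : Nat) = 2 ^ n - 1 := by rw [hN]
  rw [hfull]
  -- owner is nonempty: bounds for B's value
  obtain ⟨q, rest, hqr⟩ : ∃ q rest, pvOwner hats = q :: rest := by
    cases howner : pvOwner hats with
    | nil => have := pv_owner_len hats; rw [howner] at this; simp at this
    | cons q rest => exact ⟨q, rest, rfl⟩
  have hBbd : 0 ≤ pvF (2 ^ n - 1) (pvOwner hats) 0 ∧ pvF (2 ^ n - 1) (pvOwner hats) 0 < pvP := by
    rw [hqr]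
    exact pvF_cons_bounds _ _ _ _
  -- A's entry bounds
  have hAentry : 0 ≤ Afin.getD (2 ^ n - 1) 0 ∧ Afin.getD (2 ^ n - 1) 0 < pvP := by
    have hmem : Afin.getD (2 ^ n - 1) 0 ∈ Afin := by
      rw [List.getD_eq_getElem?_getD, List.getElem?_eq_getElem (by omega : 2 ^ n - 1 < Afin.length)]
      exact List.getElem_mem _
    exact hAbd _ hmem
  -- cast equality via the main congruence
  have hcast : ((Afin.getD (2 ^ n - 1) 0 : Int) : ZMod 1000000007) =
      ((pvF (2 ^ n - 1) (pvOwner hats) 0 : Int) : ZMod 1000000007) := by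
    rw [hA, he0']
    have hlen0 : ((1 : Int) :: List.replicate (2 ^ n - 1) 0).length = 2 ^ n := by
      simp
      omega
    have := pv_main_cast n (pvOwner hats) (pv_owner_lt hats)
      ((1 : Int) :: List.replicate (2 ^ n - 1) 0) hlen0
    rw [this, pv_sum_e0 (2 ^ n) (by omega) (pvF (2 ^ n - 1) (pvOwner hats))]
  exact pv_cast_eq_of_bounds _ _ hcast hAentry.1 hAentry.2 hBbd.1 hBbd.2

-- ===== VERDICT (by name: the statement is the Claim_ definition above) =====
theorem numberWays_spec : Claim_equal_numberWays := by
  intro hats _ _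
  unfold Spec_numberWays
  exact pv_main hats
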